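-- pv_equiv track=rewrite | github.com/ProyectoPIONERA/automap | automap/grapheval/metrics/hierarchy.py | _build_transitive_closure
-- ===== SOURCE A (Python) =====
-- from collections import defaultdict
--
-- def _build_transitive_closure(hierarchy_dict: dict) -> dict:
--     """
--     Build transitive closure of hierarchy relationships.
--
--     For each element, creates a list containing itself and all its ancestors
--     in order from most specific to most general.
--     """
--     all_elements = set(hierarchy_dict.keys()) | set(hierarchy_dict.values())
--     closure = defaultdict(list)
--
--     for element in all_elements:
--         current = element
--         closure[element].append(current)
--
--         while hierarchy_dict.get(current):
--             current = hierarchy_dict[current]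
--             closure[element].append(current)
--
--     return closure
-- ===== SOURCE B (Python) =====
-- def _build_transitive_closure(hierarchy_dict: dict) -> dict:
--     """Memoized rewrite: walk up only the uncached part of each parent chain,
--     then build every chain on that path as element + parent's cached chain."""
--     cache = {}
--     result = {}
--     for e in dict.fromkeys(list(hierarchy_dict.keys()) + list(hierarchy_dict.values())):
--         path = []
--         cur = e
--         while cur not in cache:
--             path.append(cur)
--             p = hierarchy_dict.get(cur)
--             if not p:
--                 cache[cur] = [cur]
--                 break
--             cur = p
--         for node in reversed(path):
--             if node not in cache:
--                 cache[node] = [node] + cache[hierarchy_dict[node]]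
--         result[e] = cache[e]
--     return result
-- ===== Notes on version B (the rewrite author's own statement) =====
-- stated objective: alternative
-- what changed: A rewalks the whole ancestor chain from scratch for every element (O(n*depth)); B memoizes: for each element it walks only the still-uncached prefix of its chain, then builds each chain on that prefix as node + its parent's cached chain, so every hierarchy edge is resolved once (asymptotically better on deep hierarchies, but a timing run's shallow inputs showed no measurable gain).
import Mathlib
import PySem

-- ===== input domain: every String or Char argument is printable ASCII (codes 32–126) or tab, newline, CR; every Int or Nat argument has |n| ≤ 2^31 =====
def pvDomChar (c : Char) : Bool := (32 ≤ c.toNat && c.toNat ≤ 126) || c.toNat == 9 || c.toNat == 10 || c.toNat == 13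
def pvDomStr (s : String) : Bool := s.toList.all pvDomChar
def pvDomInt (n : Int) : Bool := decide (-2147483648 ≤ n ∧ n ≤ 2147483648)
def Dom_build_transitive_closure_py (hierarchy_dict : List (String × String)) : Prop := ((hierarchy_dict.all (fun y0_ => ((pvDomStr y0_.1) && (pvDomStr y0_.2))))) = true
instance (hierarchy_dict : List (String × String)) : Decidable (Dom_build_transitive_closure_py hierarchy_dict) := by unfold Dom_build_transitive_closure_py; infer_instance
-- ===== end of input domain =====

-- B memoizes ancestor chains (walk only the uncached prefix, then chain = node + parent's cached chain) instead of A's per-element rewalk of the whole chain.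


-- shared with both ports: 'hierarchy_dict.get(cur)' used as a TRUTHY test — none when the key
-- is absent or its value is the empty string (falsy in Python)
def pvHGet (h : List (String × String)) (x : String) : Option String :=
  match (PySem.Dict.mk h).get? x with
  | some p => if p = "" then none else some p
  | none => none

-- ===== PORT A =====
-- A's inner while loop: chain = current, then parents while truthy.  Fuel h.length + 1 is
-- exact whenever the Python loop terminates (Pre_): a terminating chain never repeats a key.
def pvChainA (h : List (String × String)) : Nat → String → List String
  | 0, cur => [cur]
  | n + 1, cur =>
    match pvHGet h cur with
    | none => [cur]
    | some nxt => cur :: pvChainA h n nxt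

def build_transitive_closure_py (hierarchy_dict : List (String × String)) : List (String × List String) :=
  -- set(keys) | set(values): distinct elements; Python's hash iteration order is not modelled,
  -- insertion order is used (dict outputs are compared ignoring order)
  let all_elements := PySem.Set.ofList (hierarchy_dict.map (·.1) ++ hierarchy_dict.map (·.2))
  (all_elements.foldl
    (fun closure element =>
      PySem.Dict.insert closure element (pvChainA hierarchy_dict (hierarchy_dict.length + 1) element))
    PySem.Dict.empty).items

-- ===== PORT B =====
-- B's inner while loop: collect the uncached prefix of the chain from cur into path;
-- on a falsy parent cache the root.  Same exact fuel bound as A's loop.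
def pvWalkB (h : List (String × String)) :
    Nat → PySem.Dict String (List String) → List String → String →
    List String × PySem.Dict String (List String)
  | 0, cache, path, _ => (path, cache)
  | n + 1, cache, path, cur =>
    if (cache.get? cur).isSome then (path, cache)
    else
      match pvHGet h cur with
      | none => (path ++ [cur], cache.insert cur [cur])
      | some p => pvWalkB h n cache (path ++ [cur]) p

-- 'for node in reversed(path): cache[node] = [node] + cache[hierarchy_dict[node]]' (guarded);
-- the getD defaults are unreachable under Pre_ (every non-root path node has a truthy parent
-- whose chain is already cached), matching Python's cache[...] that never raises there.
def pvFillB (h : List (String × String)) (path : List String)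
    (cache : PySem.Dict String (List String)) : PySem.Dict String (List String) :=
  path.foldr
    (fun node c =>
      if (c.get? node).isSome then c
      else c.insert node (node :: c.getD ((PySem.Dict.mk h).getD node "") []))
    cache

def build_transitive_closure_py_alt (hierarchy_dict : List (String × String)) : List (String × List String) :=
  -- dict.fromkeys(keys + values): distinct elements in insertion order
  let order := PySem.Set.ofList (hierarchy_dict.map (·.1) ++ hierarchy_dict.map (·.2))
  (order.foldl
    (fun (st : List (String × List String) × PySem.Dict String (List String)) e =>
      let pc := pvWalkB hierarchy_dict (hierarchy_dict.length + 1) st.2 [] e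
      let c2 := pvFillB hierarchy_dict pc.1 pc.2
      (st.1 ++ [(e, c2.getD e [])], c2))
    ([], PySem.Dict.empty)).1

-- ===== PRECONDITION & SPEC =====
-- pvStops h n x: following truthy parents from x reaches a falsy/absent parent within n steps
def pvStops (h : List (String × String)) : Nat → String → Bool
  | 0, x => (pvHGet h x).isNone
  | n + 1, x =>
    match pvHGet h x with
    | none => true
    | some p => pvStops h n p

-- Pre_ excludes exactly the CYCLIC hierarchies, on which Python A's while loop never
-- terminates (a terminating chain visits distinct keys, hence stops within h.length steps).
def Pre_build_transitive_closure_py (hierarchy_dict : List (String × String)) : Prop :=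
  ∀ x ∈ hierarchy_dict.map (·.1) ++ hierarchy_dict.map (·.2),
    pvStops hierarchy_dict hierarchy_dict.length x = true
instance (hierarchy_dict : List (String × String)) : Decidable (Pre_build_transitive_closure_py hierarchy_dict) := by unfold Pre_build_transitive_closure_py; infer_instance

def pvWitness_build_transitive_closure_py : (List (String × String)) := [("a", "b"), ("b", "c")]

def Spec_build_transitive_closure_py (hierarchy_dict : List (String × String)) (out : List (String × List String)) : Prop := out = build_transitive_closure_py_alt hierarchy_dict
instance (hierarchy_dict : List (String × String)) (out : List (String × List String)) : Decidable (Spec_build_transitive_closure_py hierarchy_dict out) := by unfold Spec_build_transitive_closure_py; infer_instance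

-- ===== CLAIM (what is proved, stated in full; the proofs are below) =====
def Claim_equal_build_transitive_closure_py : Prop := ∀ (hierarchy_dict : List (String × String)), Dom_build_transitive_closure_py hierarchy_dict → Pre_build_transitive_closure_py hierarchy_dict → Spec_build_transitive_closure_py hierarchy_dict (build_transitive_closure_py hierarchy_dict)

-- ===== LEMMAS AND PROOFS =====

theorem pvChainA_of_none (h : List (String × String)) {x : String}
    (hg : pvHGet h x = none) : ∀ m, pvChainA h m x = [x] := by
  intro m; cases m <;> simp [pvChainA, hg]

theorem pvStops_mono (h : List (String × String)) {n m : Nat} {x : String}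
    (hs : pvStops h n x = true) (hnm : n ≤ m) : pvStops h m x = true := by
  induction n generalizing x m with
  | zero =>
    simp only [pvStops, Option.isNone_iff_eq_none] at hs
    cases m with
    | zero => simp [pvStops, hs]
    | succ m => simp [pvStops, hs]
  | succ n ih =>
    simp only [pvStops] at hs
    cases m with
    | zero => omega
    | succ m =>
      simp only [pvStops]
      cases hg : pvHGet h x with
      | none => rfl
      | some p => rw [hg] at hs; exact ih hs (by omega)

theorem pvChainA_stable (h : List (String × String)) {n : Nat} {x : String}
    (hs : pvStops h n x = true) (m m' : Nat) (hm : n ≤ m) (hm' : n ≤ m') :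
    pvChainA h m x = pvChainA h m' x := by
  induction n generalizing x m m' with
  | zero =>
    simp only [pvStops, Option.isNone_iff_eq_none] at hs
    rw [pvChainA_of_none h hs m, pvChainA_of_none h hs m']
  | succ n ih =>
    simp only [pvStops] at hs
    cases m with
    | zero => omega
    | succ m =>
      cases m' with
      | zero => omega
      | succ m' =>
        cases hg : pvHGet h x with
        | none => rw [pvChainA_of_none h hg, pvChainA_of_none h hg]
        | some p =>
          rw [hg] at hs
          simp only [pvChainA, hg]
          exact congrArg (List.cons x) (ih hs m m' (by omega) (by omega))

theorem pvChainA_step (h : List (String × String)) {x p : String}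
    (hs : pvStops h h.length x = true) (hg : pvHGet h x = some p) :
    pvChainA h (h.length + 1) x = x :: pvChainA h (h.length + 1) p ∧
      pvStops h h.length p = true := by
  obtain ⟨k, hL⟩ : ∃ k, h.length = k + 1 := by
    cases hLen : h.length with
    | zero =>
      exfalso
      rw [hLen] at hs
      simp [pvStops, hg, Option.isNone] at hs
    | succ k => exact ⟨k, rfl⟩
  have hsk : pvStops h k p = true := by
    rw [hL] at hs
    simpa only [pvStops, hg] using hs
  have hsp : pvStops h h.length p = true := pvStops_mono h hsk (by omega)
  have h1 : pvChainA h (h.length + 1) x = x :: pvChainA h h.length p := by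
    simp [pvChainA, hg]
  refine ⟨?_, hsp⟩
  rw [h1, pvChainA_stable h hsk h.length (h.length + 1) (by omega) (by omega)]

theorem pvChainA_suffix (h : List (String × String)) {n : Nat} {x y : String}
    (hs : pvStops h n x = true) (hn : n ≤ h.length)
    (hy : y ∈ pvChainA h (h.length + 1) x) :
    pvChainA h (h.length + 1) y <:+ pvChainA h (h.length + 1) x ∧
      pvStops h h.length y = true := by
  induction n generalizing x with
  | zero =>
    simp only [pvStops, Option.isNone_iff_eq_none] at hs
    have hc : pvChainA h (h.length + 1) x = [x] := by
      cases hL : h.length <;> simp [pvChainA, hs]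
    rw [hc] at hy; simp at hy; subst hy
    exact ⟨by rw [hc], pvStops_mono h (by simp [pvStops, hs]) (Nat.zero_le _)⟩
  | succ n ih =>
    have hsL : pvStops h h.length x = true := pvStops_mono h hs hn
    cases hg : pvHGet h x with
    | none =>
      have hc : pvChainA h (h.length + 1) x = [x] := by simp [pvChainA, hg]
      rw [hc] at hy; simp at hy; subst hy
      exact ⟨by rw [hc], hsL⟩
    | some p =>
      have hstep := pvChainA_step h hsL hg
      rw [hstep.1] at hy
      rcases List.mem_cons.mp hy with rfl | hy'
      · exact ⟨List.suffix_refl _, hsL⟩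
      · have hsp : pvStops h n p = true := by
          simp only [pvStops, hg] at hs; exact hs
        obtain ⟨hsuf, hstp⟩ := ih hsp (by omega) hy'
        exact ⟨hstep.1 ▸ hsuf.trans (List.suffix_cons x _), hstp⟩

theorem pvChainA_not_mem_parent (h : List (String × String)) {x p : String}
    (hs : pvStops h h.length x = true) (hg : pvHGet h x = some p) :
    x ∉ pvChainA h (h.length + 1) p := by
  intro hx
  obtain ⟨hstep, hsp⟩ := pvChainA_step h hs hg
  obtain ⟨hsuf, _⟩ := pvChainA_suffix h hsp (Nat.le_refl _) hx
  have := hsuf.length_le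
  rw [hstep] at this
  simp at this

-- cache invariant: every cached chain is the true chain of its key
def pvGood (h : List (String × String)) (c : PySem.Dict String (List String)) : Prop :=
  ∀ k v, c.get? k = some v → v = pvChainA h (h.length + 1) k

theorem pvWalkB_acc (h : List (String × String)) (fuel : Nat)
    (cache : PySem.Dict String (List String)) (path : List String) (cur : String) :
    pvWalkB h fuel cache path cur =
      (path ++ (pvWalkB h fuel cache [] cur).1, (pvWalkB h fuel cache [] cur).2) := by
  induction fuel generalizing path cur with
  | zero => simp [pvWalkB]
  | succ n ih =>
    simp only [pvWalkB]
    by_cases hc : (cache.get? cur).isSome = true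
    · simp [hc]
    · simp only [if_neg hc]
      cases hg : pvHGet h cur with
      | none => simp only [hg]; simp
      | some p =>
        simp only [hg]
        rw [ih (path ++ [cur]) p, ih ([] ++ [cur]) p]
        simp

-- main lemma: one resolve step (walk + fill) caches the true chain of cur, preserves the
-- invariant, and adds only keys lying on cur's chain
theorem pvResolve_spec (h : List (String × String)) :
    ∀ (n fuel : Nat) (cache : PySem.Dict String (List String)) (cur : String),
      pvStops h n cur = true → n < fuel → n ≤ h.length → pvGood h cache →
      pvGood h (pvFillB h (pvWalkB h fuel cache [] cur).1 (pvWalkB h fuel cache [] cur).2) ∧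
      (pvFillB h (pvWalkB h fuel cache [] cur).1 (pvWalkB h fuel cache [] cur).2).get? cur =
        some (pvChainA h (h.length + 1) cur) ∧
      (∀ k, ((pvFillB h (pvWalkB h fuel cache [] cur).1 (pvWalkB h fuel cache [] cur).2).get? k).isSome →
        (cache.get? k).isSome ∨ k ∈ pvChainA h (h.length + 1) cur) := by
  intro n
  induction n with
  | zero =>
    intro fuel cache cur hs hfuel hlen hgood
    obtain ⟨f, rfl⟩ := Nat.exists_eq_add_of_lt hfuel
    simp only [pvStops, Option.isNone_iff_eq_none] at hs
    have hchain : pvChainA h (h.length + 1) cur = [cur] := by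
      cases h.length <;> simp [pvChainA, hs]
    simp only [Nat.zero_add, pvWalkB]
    by_cases hc : (cache.get? cur).isSome = true
    · simp only [if_pos hc, pvFillB, List.foldr_nil]
      obtain ⟨v, hv⟩ := Option.isSome_iff_exists.mp hc
      refine ⟨hgood, ?_, fun k hk => Or.inl hk⟩
      rw [hv, hgood cur v hv]
    · simp only [if_neg hc, hs, pvFillB, List.nil_append, List.foldr_cons, List.foldr_nil,
        PySem.Dict.get?_insert_self, Option.isSome_some, if_true]
      refine ⟨?_, ?_, ?_⟩
      · intro k v hkv
        rw [PySem.Dict.get?_insert] at hkv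
        split at hkv
        · rename_i hk; subst hk; injection hkv with hv; rw [← hv, hchain]
        · exact hgood k v hkv
      · rw [hchain]
      · intro k hk
        rw [PySem.Dict.get?_insert] at hk
        split at hk
        · rename_i hkc; subst hkc; right; rw [hchain]; simp
        · exact Or.inl hk
  | succ n ih =>
    intro fuel cache cur hs hfuel hlen hgood
    obtain ⟨f, rfl⟩ := Nat.exists_eq_add_of_lt hfuel
    have hsL : pvStops h h.length cur = true := pvStops_mono h hs hlen
    simp only [pvWalkB]
    by_cases hc : (cache.get? cur).isSome = true
    · simp only [if_pos hc, pvFillB, List.foldr_nil]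
      obtain ⟨v, hv⟩ := Option.isSome_iff_exists.mp hc
      refine ⟨hgood, ?_, fun k hk => Or.inl hk⟩
      rw [hv, hgood cur v hv]
    · simp only [if_neg hc]
      cases hg : pvHGet h cur with
      | none =>
        have hchain : pvChainA h (h.length + 1) cur = [cur] := by simp [pvChainA, hg]
        simp only [hg, pvFillB, List.nil_append, List.foldr_cons, List.foldr_nil,
          PySem.Dict.get?_insert_self, Option.isSome_some, if_true]
        refine ⟨?_, ?_, ?_⟩
        · intro k v hkv
          rw [PySem.Dict.get?_insert] at hkv
          split at hkv
          · rename_i hk; subst hk; injection hkv with hv; rw [← hv, hchain]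
          · exact hgood k v hkv
        · rw [hchain]
        · intro k hk
          rw [PySem.Dict.get?_insert] at hk
          split at hk
          · rename_i hkc; subst hkc; right; rw [hchain]; simp
          · exact Or.inl hk
      | some p =>
        have hsp : pvStops h n p = true := by simp only [pvStops, hg] at hs; exact hs
        obtain ⟨hstep, hspL⟩ := pvChainA_step h hsL hg
        simp only [hg]
        rw [pvWalkB_acc h (n + 1 + f) cache ([] ++ [cur]) p]
        obtain ⟨ihGood, ihGet, ihNew⟩ :=
          ih (n + 1 + f) cache p hsp (by omega) (by omega) hgood
        set s' := (pvWalkB h (n + 1 + f) cache [] p).1 with hs'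
        set c1 := (pvWalkB h (n + 1 + f) cache [] p).2 with hc1
        set c2' := pvFillB h s' c1 with hc2'
        have hfold : pvFillB h (cur :: s') c1 =
            (if (c2'.get? cur).isSome then c2'
             else c2'.insert cur (cur :: c2'.getD ((PySem.Dict.mk h).getD cur "") [])) := by
          simp only [pvFillB, List.foldr_cons, hc2']
        have hcurNone : (c2'.get? cur).isSome = false := by
          by_contra hcontra
          simp only [Bool.not_eq_false] at hcontra
          rcases ihNew cur hcontra with hInCache | hInChain
          · exact hc hInCache
          · exact pvChainA_not_mem_parent h hsL hg hInChain
        have hDGetD : (PySem.Dict.mk h).getD cur "" = p := by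
          simp only [pvHGet] at hg
          cases hq : (PySem.Dict.mk h).get? cur with
          | none => rw [hq] at hg; simp at hg
          | some q =>
            rw [hq] at hg
            by_cases hqe : q = "" <;> simp [hqe] at hg
            rw [PySem.Dict.getD_eq_get?_getD, hq, hg]; rfl
        have hCGetD : c2'.getD p [] = pvChainA h (h.length + 1) p := by
          rw [PySem.Dict.getD_eq_get?_getD, ihGet]; rfl
        simp only [List.nil_append, List.singleton_append]
        rw [hfold, hcurNone]
        simp only [Bool.false_eq_true, if_false, hDGetD, hCGetD]
        refine ⟨?_, ?_, ?_⟩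
        · intro k v hkv
          rw [PySem.Dict.get?_insert] at hkv
          split at hkv
          · rename_i hk; subst hk; injection hkv with hv; rw [← hv, hstep]
          · exact ihGood k v hkv
        · rw [PySem.Dict.get?_insert_self, hstep]
        · intro k hk
          rw [PySem.Dict.get?_insert] at hk
          split at hk
          · rename_i hkc; subst hkc; right; rw [hstep]; simp
          · rcases ihNew k hk with hL | hR
            · exact Or.inl hL
            · right; rw [hstep]; exact List.mem_cons_of_mem _ hR

-- B's outer fold produces exactly the list of (element, true chain) pairs
theorem pvFoldB_spec (h : List (String × String)) (l : List String)
    (acc : List (String × List String)) (cache : PySem.Dict String (List String))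
    (hstops : ∀ x ∈ l, pvStops h h.length x = true) (hgood : pvGood h cache) :
    (l.foldl
      (fun (st : List (String × List String) × PySem.Dict String (List String)) e =>
        let pc := pvWalkB h (h.length + 1) st.2 [] e
        let c2 := pvFillB h pc.1 pc.2
        (st.1 ++ [(e, c2.getD e [])], c2))
      (acc, cache)).1 =
      acc ++ l.map (fun e => (e, pvChainA h (h.length + 1) e)) := by
  induction l generalizing acc cache with
  | nil => simp
  | cons e l ihl =>
    have he : pvStops h h.length e = true := hstops e (List.mem_cons_self)
    obtain ⟨hGood2, hGet2, _⟩ :=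
      pvResolve_spec h h.length (h.length + 1) cache e he (by omega) (Nat.le_refl _) hgood
    simp only [List.foldl_cons]
    rw [ihl _ _ (fun x hx => hstops x (List.mem_cons_of_mem _ hx)) hGood2]
    have : (pvFillB h (pvWalkB h (h.length + 1) cache [] e).1
        (pvWalkB h (h.length + 1) cache [] e).2).getD e [] =
        pvChainA h (h.length + 1) e := by
      rw [PySem.Dict.getD_eq_get?_getD, hGet2]; rfl
    simp [this]

-- ===== VERDICT (by name: the statement is the Claim_ definition above) =====
theorem build_transitive_closure_py_spec : Claim_equal_build_transitive_closure_py := by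
  intro h _hdom hpre
  unfold Spec_build_transitive_closure_py
  unfold build_transitive_closure_py build_transitive_closure_py_alt
  dsimp only
  set L := h.map (·.1) ++ h.map (·.2) with hL
  -- A side: all keys are fresh and distinct, so the insert loop appends
  have hAitems :
      (List.foldl (fun (closure : PySem.Dict String (List String)) element =>
          closure.insert element (pvChainA h (h.length + 1) element)) PySem.Dict.empty
        (PySem.Set.ofList L)).items
      = PySem.Dict.empty.items ++
          (PySem.Set.ofList L).map (fun a => (a, pvChainA h (h.length + 1) a)) := by
    have hfr := PySem.Dict.items_foldl_insert_fresh (PySem.Set.ofList L) (fun a => a)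
        (fun a => pvChainA h (h.length + 1) a) PySem.Dict.empty
        (fun a _ => PySem.Dict.contains_empty a)
        (by simp [PySem.Set.nodup_ofList L])
    exact hfr
  rw [hAitems]
  -- B side
  rw [pvFoldB_spec h (PySem.Set.ofList L) [] PySem.Dict.empty
      (fun x hx => hpre x ((PySem.Set.mem_ofList L x).mp hx))
      (by intro k v hkv; rw [PySem.Dict.get?_empty] at hkv; exact absurd hkv (by simp))]
  simp [PySem.Dict.empty]
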